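-- pv_equiv track=rewrite | github.com/MrWQ/linkSpider | changeLink.py | changeLink4
-- ===== SOURCE A (Python) =====
-- def removeNull(urlList):
--     urlList = list(urlList)
--     if urlList != []:
--         while '' in urlList:
--             urlList.remove('')
--
-- def changeLink4(urlList,url):
--     headList1 = []  # 用来记录索引位置到末尾到距离    ./开头的链接 ./favicon.ico 的加头和域名
--     length = len(urlList)
--     count = 0
--
--     for count in range(0, length):
--         if (urlList[count][0] == '.' and urlList[count][1] == '/'):  # ./开头的链接转换
--             headList1.append(length - count)  # 记录当前索引位置到末尾到距离
--             count = count + 1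
--         else:
--             count = count + 1
--     #     ./开头的转换
--     for i in headList1:
--         i = int(i)
--         length = len(urlList)
--         # 去掉.    取./后面的值
--         temp = urlList[length - i][2:]
--         urlList[length - i] = url + temp
--     removeNull(urlList)  # 去掉空值
--     return urlList
-- ===== SOURCE B (Python) =====
-- def changeLink4(urlList, url):
--     # single pass: rewrite './...' entries in place; no index table, no second loop
--     # (removeNull in A only mutates a local copy, so it is dropped as dead code)
--     for i, e in enumerate(urlList):
--         if e[0] == '.' and e[1] == '/':
--             urlList[i] = url + e[2:]
--     return urlList
-- ===== Notes on version B (the rewrite author's own statement) =====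
-- stated objective: simpler
-- what changed: B rewrites './'-prefixed entries in one direct enumerate pass, eliminating A's headList1 distance-to-end index table, the second rewriting loop, and the dead removeNull call.
import Mathlib
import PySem

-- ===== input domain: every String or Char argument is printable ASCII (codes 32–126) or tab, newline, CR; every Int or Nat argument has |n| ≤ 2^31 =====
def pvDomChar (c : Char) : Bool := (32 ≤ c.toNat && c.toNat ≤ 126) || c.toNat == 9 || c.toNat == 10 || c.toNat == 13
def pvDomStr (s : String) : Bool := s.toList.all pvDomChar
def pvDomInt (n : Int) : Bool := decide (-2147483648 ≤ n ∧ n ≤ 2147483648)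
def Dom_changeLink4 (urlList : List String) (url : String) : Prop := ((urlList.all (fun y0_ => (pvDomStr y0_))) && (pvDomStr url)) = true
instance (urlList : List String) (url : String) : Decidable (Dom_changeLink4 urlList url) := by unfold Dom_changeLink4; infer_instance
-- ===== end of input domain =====

-- B rewrites './'-prefixed entries in one direct pass, removing A's distance-to-end index
-- table and second loop (and A's dead removeNull call); same return value, same in-place
-- mutation in Python; equivalence here is about the return value.


-- ===== PORT A =====
-- Python's `e[0] == '.' and e[1] == '/'`; under Pre_ both indexings succeed, so the
-- Option comparison is exact there.
def condA (s : String) : Bool :=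
  (PySem.Str.pyGet? s 0 == some '.') && (PySem.Str.pyGet? s 1 == some '/')

-- Literal port of A: first loop records distances-to-end in headList1, second loop
-- rewrites urlList[length - i].  removeNull mutates only a local copy (no effect): omitted.
def changeLink4 (urlList : List String) (url : String) : List String :=
  let length := urlList.length
  let headList1 := (List.range length).foldl
    (fun acc count => if condA (urlList.getD count "") then acc ++ [length - count] else acc) []
  headList1.foldl
    (fun lst i =>
      lst.set (lst.length - i) (url ++ ((lst.getD (lst.length - i) "").drop 2))) urlList

-- ===== PORT B =====
def condB (s : String) : Bool :=
  (PySem.Str.pyGet? s 0 == some '.') && (PySem.Str.pyGet? s 1 == some '/')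

-- Single pass over the list, rewriting './'-entries directly.
def altGo (url : String) : List String → List String
  | [] => []
  | e :: rest => (if condB e then url ++ e.drop 2 else e) :: altGo url rest

def changeLink4_alt (urlList : List String) (url : String) : List String :=
  altGo url urlList

-- ===== PRECONDITION & SPEC =====
-- Pre_ excludes exactly the inputs where Python A raises IndexError: an empty-string
-- element (e[0] raises) or an element "." (e[0]=='.' succeeds, e[1] raises).
def Pre_changeLink4 (urlList : List String) (url : String) : Prop :=
  ∀ s ∈ urlList, PySem.Str.pyGet? s 0 ≠ none ∧
    (PySem.Str.pyGet? s 0 = some '.' → PySem.Str.pyGet? s 1 ≠ none)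
instance (urlList : List String) (url : String) : Decidable (Pre_changeLink4 urlList url) := by
  unfold Pre_changeLink4; infer_instance

def pvWitness_changeLink4 : List String × String := (["./favicon.ico", "http://a/b", "./"], "http://x.com/")

def Spec_changeLink4 (urlList : List String) (url : String) (out : List String) : Prop := out = changeLink4_alt urlList url
instance (urlList : List String) (url : String) (out : List String) : Decidable (Spec_changeLink4 urlList url out) := by unfold Spec_changeLink4; infer_instance

-- ===== CLAIM (what is proved, stated in full; the proofs are below) =====
def Claim_equal_changeLink4 : Prop := ∀ (urlList : List String) (url : String), Dom_changeLink4 urlList url → Pre_changeLink4 urlList url → Spec_changeLink4 urlList url (changeLink4 urlList url)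

-- ===== LEMMAS AND PROOFS =====

-- A's first loop in closed form (filterMap of the range).
theorem headList_eq (p : Nat → Bool) (f : Nat → Nat) :
    ∀ (l : List Nat) (acc : List Nat),
      l.foldl (fun acc c => if p c then acc ++ [f c] else acc) acc
        = acc ++ l.filterMap (fun c => if p c then some (f c) else none) := by
  intro l
  induction l with
  | nil => simp
  | cons c t ih =>
    intro acc
    by_cases h : p c <;> simp [h, ih]

-- A with its first loop replaced by that closed form.
theorem A_closed (url : String) (L : List String) :
    changeLink4 L url =
      ((List.range L.length).filterMap
          (fun c => if condA (L.getD c "") then some (L.length - c) else none)).foldl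
        (fun lst i => lst.set (lst.length - i) (url ++ ((lst.getD (lst.length - i) "").drop 2))) L := by
  show ((List.range L.length).foldl
      (fun acc count => if condA (L.getD count "") then acc ++ [L.length - count] else acc) []).foldl
      (fun lst i => lst.set (lst.length - i) (url ++ ((lst.getD (lst.length - i) "").drop 2))) L = _
  rw [headList_eq]
  rfl

-- A's second loop leaves a cons head alone when every recorded distance stays within the tail.
theorem fold_set_cons (url : String) :
    ∀ (is : List Nat) (x : String) (lst : List String), (∀ i ∈ is, i ≤ lst.length) →
      is.foldl (fun lst i =>
          lst.set (lst.length - i) (url ++ ((lst.getD (lst.length - i) "").drop 2))) (x :: lst)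
        = x :: is.foldl (fun lst i =>
          lst.set (lst.length - i) (url ++ ((lst.getD (lst.length - i) "").drop 2))) lst := by
  intro is
  induction is with
  | nil => simp
  | cons i t ih =>
    intro x lst h
    have hi : i ≤ lst.length := h i (by simp)
    have hidx : (x :: lst).length - i = (lst.length - i) + 1 := by
      simp [List.length_cons]; omega
    simp only [List.foldl_cons, hidx, List.set_cons_succ, List.getD_cons_succ]
    rw [ih]
    intro j hj
    have := h j (by simp [hj])
    simpa using this

-- distances recorded by A are bounded by the length
theorem mem_filterMap_le (p : Nat → Bool) (n : Nat) :
    ∀ i ∈ (List.range n).filterMap (fun c => if p c then some (n - c) else none), i ≤ n := by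
  intro i hi
  rcases List.mem_filterMap.mp hi with ⟨c, _, hc⟩
  by_cases h : p c
  · simp [h] at hc; omega
  · simp [h] at hc

theorem main_eq (url : String) :
    ∀ (urlList : List String), changeLink4 urlList url = altGo url urlList := by
  intro urlList
  induction urlList with
  | nil => rw [A_closed]; rfl
  | cons e rest ih =>
    rw [A_closed, List.length_cons, List.range_succ_eq_map, List.filterMap_cons, List.filterMap_map]
    have hfm : ((fun c => if condA ((e :: rest).getD c "") then some (rest.length + 1 - c) else none)
          ∘ Nat.succ)
        = fun c => if condA (rest.getD c "") then some (rest.length - c) else none := by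
      funext c
      simp [Function.comp, Nat.succ_sub_succ]
    rw [hfm]
    have hbound := mem_filterMap_le (fun c => condA (rest.getD c "")) rest.length
    have hArest : ((List.range rest.length).filterMap
          (fun c => if condA (rest.getD c "") then some (rest.length - c) else none)).foldl
        (fun lst i => lst.set (lst.length - i) (url ++ ((lst.getD (lst.length - i) "").drop 2))) rest
        = altGo url rest := (A_closed url rest).symm.trans ih
    by_cases hc : condB e = true
    · rw [List.getD_cons_zero, if_pos (show condA e = true from hc), Nat.sub_zero, List.foldl_cons]
      have hset :
          (e :: rest).set ((e :: rest).length - (rest.length + 1))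
              (url ++ (((e :: rest).getD ((e :: rest).length - (rest.length + 1)) "").drop 2))
            = (url ++ e.drop 2) :: rest := by
        simp [List.length_cons]
      rw [hset, fold_set_cons url _ _ rest hbound, hArest]
      simp [altGo, hc]
    · rw [List.getD_cons_zero, if_neg (show ¬ condA e = true from hc)]
      rw [fold_set_cons url _ _ rest hbound, hArest]
      simp [altGo, hc]

-- ===== VERDICT (by name: the statement is the Claim_ definition above) =====
theorem changeLink4_spec : Claim_equal_changeLink4 := by
  intro urlList url _ _
  unfold Spec_changeLink4 changeLink4_alt
  exact main_eq url urlList
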